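-- pv_equiv track=rewrite | github.com/Devadathan525/Water-Management-System---Prototype | analytics.py | _hour_to_shift
-- ===== SOURCE A (Python) =====
-- SHIFT_DEF = [
--     ("Shift A", 6, 14),   # 06:00–14:00
--     ("Shift B", 14, 22),  # 14:00–22:00
--     ("Shift C", 22, 6),   # 22:00–06:00 (overnight)
-- ]
--
-- def _hour_to_shift(h: int) -> str:
--     for name, start, end in SHIFT_DEF:
--         if start < end:
--             if start <= h < end:
--                 return name
--         else:
--             # overnight window
--             if h >= start or h < end:
--                 return name
--     return "Unknown"
-- ===== SOURCE B (Python) =====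
-- def _hour_to_shift(h: int) -> str:
--     # Daytime shifts are two equal 8-hour bands starting at 06:00, so the
--     # shift letter is computed arithmetically from the hour; everything
--     # else (the overnight window) is Shift C.
--     if 6 <= h < 22:
--         return "Shift " + chr(ord("A") + (h - 6) // 8)
--     return "Shift C"
-- ===== Notes on version B (the rewrite author's own statement) =====
-- stated objective: alternative
-- what changed: Replaced the loop over the SHIFT_DEF table of interval checks by an arithmetic computation: inside the daytime band 6<=h<22 the shift letter is derived by floor division ((h-6)//8 selects 'A' or 'B') and concatenated to the prefix, with everything else classified as Shift C; no per-shift interval tests remain.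
import Mathlib
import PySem

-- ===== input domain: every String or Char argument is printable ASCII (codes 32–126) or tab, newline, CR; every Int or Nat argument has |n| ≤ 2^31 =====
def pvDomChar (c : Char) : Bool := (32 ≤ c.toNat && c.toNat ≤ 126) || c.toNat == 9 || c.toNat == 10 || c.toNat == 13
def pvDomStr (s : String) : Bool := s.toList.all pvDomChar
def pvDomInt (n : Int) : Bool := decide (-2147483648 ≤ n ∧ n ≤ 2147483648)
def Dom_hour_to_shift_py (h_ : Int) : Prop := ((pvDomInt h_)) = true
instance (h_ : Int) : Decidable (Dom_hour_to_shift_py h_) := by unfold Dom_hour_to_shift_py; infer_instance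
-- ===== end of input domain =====

-- B replaces A's loop of interval tests over SHIFT_DEF by arithmetic: inside the
-- daytime band the shift letter is computed by floor division (alternative, same cost).

-- ===== PORT A =====
-- module-level table SHIFT_DEF
def shiftDef : List (String × Int × Int) :=
  [("Shift A", 6, 14), ("Shift B", 14, 22), ("Shift C", 22, 6)]

-- the for-loop with early return, as structural recursion over the table
def hourToShiftLoop (h_ : Int) : List (String × Int × Int) → String
  | [] => "Unknown"
  | (name, start, end_) :: rest =>
    if start < end_ then
      if start ≤ h_ ∧ h_ < end_ then name else hourToShiftLoop h_ rest
    else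
      if h_ ≥ start ∨ h_ < end_ then name else hourToShiftLoop h_ rest

def hour_to_shift_py (h_ : Int) : String := hourToShiftLoop h_ shiftDef

-- ===== PORT B =====
-- "Shift " + chr(ord("A") + (h - 6) // 8) ; else "Shift C"
def hour_to_shift_py_alt (h_ : Int) : String :=
  if 6 ≤ h_ ∧ h_ < 22 then
    "Shift " ++ String.mk [Char.ofNat (65 + (PySem.Int.floordiv (h_ - 6) 8)).toNat]
  else "Shift C"

-- ===== PRECONDITION & SPEC =====
def Spec_hour_to_shift_py (h_ : Int) (out : String) : Prop := out = hour_to_shift_py_alt h_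
instance (h_ : Int) (out : String) : Decidable (Spec_hour_to_shift_py h_ out) := by unfold Spec_hour_to_shift_py; infer_instance

-- ===== CLAIM =====
def Claim_equal_hour_to_shift_py : Prop := ∀ (h_ : Int), Dom_hour_to_shift_py h_ → Spec_hour_to_shift_py h_ (hour_to_shift_py h_)

-- ===== LEMMAS AND PROOFS =====
theorem fd_zero (h_ : Int) (h1 : 6 ≤ h_) (h2 : h_ < 14) : PySem.Int.floordiv (h_ - 6) 8 = 0 := by
  rw [PySem.Int.floordiv_eq_ediv_of_pos (by omega)]; omega

theorem fd_one (h_ : Int) (h1 : 14 ≤ h_) (h2 : h_ < 22) : PySem.Int.floordiv (h_ - 6) 8 = 1 := by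
  rw [PySem.Int.floordiv_eq_ediv_of_pos (by omega)]; omega

-- ===== VERDICT =====
theorem hour_to_shift_py_spec : Claim_equal_hour_to_shift_py := by
  intro h_ _
  simp only [Spec_hour_to_shift_py, hour_to_shift_py, shiftDef, hourToShiftLoop,
    hour_to_shift_py_alt]
  by_cases hA : 6 ≤ h_ ∧ h_ < 14
  · rw [fd_zero h_ hA.1 hA.2]
    split_ifs <;> first | rfl | omega
  · by_cases hB : 14 ≤ h_ ∧ h_ < 22
    · rw [fd_one h_ hB.1 hB.2]
      split_ifs <;> first | rfl | omega
    · split_ifs <;> first | rfl | omega
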